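-- pv_equiv track=rewrite | github.com/TheFraserLab/ASEr | bin/CountSNPASE.py | CIGAR_to_Genomic_Positions
-- ===== SOURCE A (Python) =====
-- def CIGAR_to_Genomic_Positions(cigar_types, cigar_vals, pos):
--     """Use the CIGAR string to return a list of genomic coordinates.
--
--     Coordinates correspond to the individual bases of the read to get SNP
--     positions from the MD tag.
--     """
--     # Initialize the list of genomic positions
--     genomic_positions = []
--     curr_pos = pos
--
--     for i in range(len(cigar_types)):
--         # What are we going to do to each CIGAR str.
--         if cigar_types[i] == 'N':
--             curr_pos = int(curr_pos) + int(cigar_vals[i])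
--         elif cigar_types[i] == 'D':
--             curr_pos = int(curr_pos) + int(cigar_vals[i])
--         elif cigar_types[i] == 'M':
--             genomic_positions = genomic_positions + list(range(int(curr_pos),
--                                                                int(curr_pos)+int(cigar_vals[i])))
--             curr_pos = int(curr_pos) + int(cigar_vals[i])
--     return genomic_positions
-- ===== SOURCE B (Python) =====
-- def CIGAR_to_Genomic_Positions(cigar_types, cigar_vals, pos):
--     """Two-pass version: first tabulate each op's starting genomic
--     coordinate by a prefix sum of advances, then emit ranges for M ops."""
--     advances = [int(v) if t in ('M', 'N', 'D') else 0
--                 for t, v in zip(cigar_types, cigar_vals)]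
--     starts = [int(pos)]
--     for a in advances:
--         starts.append(starts[-1] + a)
--     out = []
--     for t, v, s in zip(cigar_types, cigar_vals, starts):
--         if t == 'M':
--             out.extend(range(s, s + int(v)))
--     return out
-- ===== Notes on version B (the rewrite author's own statement) =====
-- stated objective: alternative
-- what changed: B replaces A's single loop with an interleaved running cursor by two separate passes: a prefix-sum table of each op's starting genomic coordinate, then an emission pass that extends the output with a range for each M op.
import Mathlib
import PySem

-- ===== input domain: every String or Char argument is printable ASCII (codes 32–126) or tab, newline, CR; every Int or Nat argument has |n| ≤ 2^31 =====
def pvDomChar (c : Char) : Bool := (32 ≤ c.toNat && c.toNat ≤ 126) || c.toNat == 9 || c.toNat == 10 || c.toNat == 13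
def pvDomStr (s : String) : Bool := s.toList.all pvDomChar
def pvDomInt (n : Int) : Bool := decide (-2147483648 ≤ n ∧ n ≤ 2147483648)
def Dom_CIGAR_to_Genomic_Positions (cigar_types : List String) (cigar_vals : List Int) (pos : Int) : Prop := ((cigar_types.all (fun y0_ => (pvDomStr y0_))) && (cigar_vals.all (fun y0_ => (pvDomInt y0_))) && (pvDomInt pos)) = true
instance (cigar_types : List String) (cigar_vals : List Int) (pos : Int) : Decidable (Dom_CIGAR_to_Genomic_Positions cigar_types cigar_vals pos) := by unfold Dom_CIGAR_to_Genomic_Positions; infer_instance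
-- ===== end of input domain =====

-- B separates position tracking (a prefix-sum table of op start coordinates) from
-- emission of M ranges, instead of A's single loop with an interleaved cursor; objective: alternative decomposition.

-- ===== PORT A =====
-- getD is Python's xs[i] for the in-range nonnegative indices this loop produces;
-- cigar_vals[i] out of range (IndexError) is excluded by Pre_ below.
def CIGAR_to_Genomic_Positions (cigar_types : List String) (cigar_vals : List Int) (pos : Int) : List Int :=
  ((List.range cigar_types.length).foldl
    (fun (st : List Int × Int) i =>
      if cigar_types.getD i "" = "N" then (st.1, st.2 + cigar_vals.getD i 0)
      else if cigar_types.getD i "" = "D" then (st.1, st.2 + cigar_vals.getD i 0)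
      else if cigar_types.getD i "" = "M" then
        (st.1 ++ PySem.List.pyRange st.2 (st.2 + cigar_vals.getD i 0) 1, st.2 + cigar_vals.getD i 0)
      else st)
    ([], pos)).1

-- ===== PORT B =====
def CIGAR_to_Genomic_Positions_alt (cigar_types : List String) (cigar_vals : List Int) (pos : Int) : List Int :=
  let advances := List.zipWith
    (fun t v => if t = "M" ∨ t = "N" ∨ t = "D" then v else 0) cigar_types cigar_vals
  let starts := advances.scanl (· + ·) pos
  (List.zipWith3
    (fun t v s => if t = "M" then PySem.List.pyRange s (s + v) 1 else ([] : List Int))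
    cigar_types cigar_vals starts).flatten

-- ===== PRECONDITION & SPEC =====
-- Pre_ excludes exactly the inputs where an M/N/D op at index i has no value
-- (i ≥ len(cigar_vals)): there Python A raises IndexError.
def Pre_CIGAR_to_Genomic_Positions (cigar_types : List String) (cigar_vals : List Int) (pos : Int) : Prop :=
  ∀ i, i < cigar_types.length →
    (cigar_types.getD i "" = "M" ∨ cigar_types.getD i "" = "N" ∨ cigar_types.getD i "" = "D") →
    i < cigar_vals.length
instance (cigar_types : List String) (cigar_vals : List Int) (pos : Int) : Decidable (Pre_CIGAR_to_Genomic_Positions cigar_types cigar_vals pos) := by unfold Pre_CIGAR_to_Genomic_Positions; infer_instance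
def pvWitness_CIGAR_to_Genomic_Positions : List String × List Int × Int := (["M", "N", "I", "M"], [2, 3, 7, 1], 10)

def Spec_CIGAR_to_Genomic_Positions (cigar_types : List String) (cigar_vals : List Int) (pos : Int) (out : List Int) : Prop := out = CIGAR_to_Genomic_Positions_alt cigar_types cigar_vals pos
instance (cigar_types : List String) (cigar_vals : List Int) (pos : Int) (out : List Int) : Decidable (Spec_CIGAR_to_Genomic_Positions cigar_types cigar_vals pos out) := by unfold Spec_CIGAR_to_Genomic_Positions; infer_instance

-- ===== CLAIM (what is proved, stated in full; the proofs are below) =====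
def Claim_equal_CIGAR_to_Genomic_Positions : Prop := ∀ (cigar_types : List String) (cigar_vals : List Int) (pos : Int), Dom_CIGAR_to_Genomic_Positions cigar_types cigar_vals pos → Pre_CIGAR_to_Genomic_Positions cigar_types cigar_vals pos → Spec_CIGAR_to_Genomic_Positions cigar_types cigar_vals pos (CIGAR_to_Genomic_Positions cigar_types cigar_vals pos)

-- ===== LEMMAS AND PROOFS =====

theorem pv_zipWith3_cons (f : String → Int → Int → List Int) (t : String) (v s : Int)
    (ts : List String) (vs ss : List Int) :
    List.zipWith3 f (t :: ts) (v :: vs) (s :: ss) = f t v s :: List.zipWith3 f ts vs ss := rfl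

theorem pv_zipWith3_nil_mid (f : String → Int → Int → List Int) (ts : List String) (ss : List Int) :
    List.zipWith3 f ts [] ss = [] := by cases ts <;> cases ss <;> rfl

theorem pv_zipWith3_nil_left (f : String → Int → Int → List Int) (vs ss : List Int) :
    List.zipWith3 f [] vs ss = [] := rfl

theorem pv_main : ∀ (ts : List String) (vs : List Int) (gp : List Int) (p : Int),
    Pre_CIGAR_to_Genomic_Positions ts vs p →
    ((List.range ts.length).foldl
      (fun (st : List Int × Int) i =>
        if ts.getD i "" = "N" then (st.1, st.2 + vs.getD i 0)
        else if ts.getD i "" = "D" then (st.1, st.2 + vs.getD i 0)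
        else if ts.getD i "" = "M" then
          (st.1 ++ PySem.List.pyRange st.2 (st.2 + vs.getD i 0) 1, st.2 + vs.getD i 0)
        else st)
      (gp, p)).1
    = gp ++ CIGAR_to_Genomic_Positions_alt ts vs p := by
  intro ts
  induction ts with
  | nil =>
    intro vs gp p _
    simp [CIGAR_to_Genomic_Positions_alt, pv_zipWith3_nil_left]
  | cons t ts ih =>
    intro vs gp p hpre
    rw [List.length_cons, List.range_succ_eq_map, List.foldl_cons, List.foldl_map]
    cases vs with
    | nil =>
      have hnm : ¬ (t = "M" ∨ t = "N" ∨ t = "D") := by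
        intro hm
        have := hpre 0 (by simp) (by simpa using hm)
        simp at this
      have h1 : t ≠ "N" := fun h => hnm (Or.inr (Or.inl h))
      have h2 : t ≠ "D" := fun h => hnm (Or.inr (Or.inr h))
      have h3 : t ≠ "M" := fun h => hnm (Or.inl h)
      have hpre' : Pre_CIGAR_to_Genomic_Positions ts [] p := by
        intro i hi hm
        have := hpre (i+1) (by simpa using Nat.succ_lt_succ hi) (by simpa using hm)
        simp at this
      have := ih [] gp p hpre'
      simp only [List.getD_cons_zero, List.getD_cons_succ, List.getD_nil] at this ⊢
      simp only [h1, h2, h3, if_false] at this ⊢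
      rw [this]
      simp [CIGAR_to_Genomic_Positions_alt, pv_zipWith3_nil_mid]
    | cons v vs =>
      have hpre' : Pre_CIGAR_to_Genomic_Positions ts vs p := by
        intro i hi hm
        have := hpre (i+1) (by simpa using Nat.succ_lt_succ hi) (by simpa using hm)
        simpa using this
      simp only [List.getD_cons_zero, List.getD_cons_succ]
      by_cases hN : t = "N"
      · have hM : t ≠ "M" := by simp [hN]
        rw [if_pos hN]
        rw [ih vs gp (p + v) hpre']
        simp [CIGAR_to_Genomic_Positions_alt, hN, List.scanl_cons, pv_zipWith3_cons]
      · by_cases hD : t = "D"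
        · have hM : t ≠ "M" := by simp [hD]
          rw [if_neg hN, if_pos hD]
          rw [ih vs gp (p + v) hpre']
          simp [CIGAR_to_Genomic_Positions_alt, hD, List.scanl_cons, pv_zipWith3_cons]
        · by_cases hM : t = "M"
          · rw [if_neg hN, if_neg hD, if_pos hM]
            rw [ih vs (gp ++ PySem.List.pyRange p (p + v) 1) (p + v) hpre']
            simp [CIGAR_to_Genomic_Positions_alt, hM, List.scanl_cons, pv_zipWith3_cons]
          · rw [if_neg hN, if_neg hD, if_neg hM]
            rw [ih vs gp p hpre']
            simp [CIGAR_to_Genomic_Positions_alt, hM, hN, hD, List.scanl_cons, pv_zipWith3_cons]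

-- ===== VERDICT (by name: the statement is the Claim_ definition above) =====
theorem CIGAR_to_Genomic_Positions_spec : Claim_equal_CIGAR_to_Genomic_Positions := by
  intro ts vs p _ hpre
  unfold Spec_CIGAR_to_Genomic_Positions CIGAR_to_Genomic_Positions
  simpa using pv_main ts vs [] p hpre
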